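-- pv_equiv track=rewrite | github.com/neerajmanivarnan/CodeStreak | day14q2py.py | helper
-- ===== SOURCE A (Python) =====
-- def helper(str):
--     str = str.lower()
--     vowels = 0
--     consonants = 0
--     char_counts = {}
--
--     for char in str:
--         if char in "aeiou":
--             if char not in char_counts:
--                 vowels += 1
--                 char_counts[char] = 0
--         elif char.isalpha():
--             if char not in char_counts:
--                 consonants += 1
--                 char_counts[char] = 0
--
--     return vowels == consonants
-- ===== SOURCE B (Python) =====
-- def helper(str):
--     s = str.lower()
--     diff = 0
--     for c in "abcdefghijklmnopqrstuvwxyz":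
--         if c in s:
--             diff += 1 if c in "aeiou" else -1
--     return diff == 0
-- ===== Notes on version B (the rewrite author's own statement) =====
-- stated objective: faster
-- what changed: Instead of A's single Python-level pass over the input with a first-seen dict and two tallies, B iterates over the fixed 26-letter alphabet, tests each letter for membership in the lowered string, and accumulates one signed vowel-minus-consonant difference.
import Mathlib
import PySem

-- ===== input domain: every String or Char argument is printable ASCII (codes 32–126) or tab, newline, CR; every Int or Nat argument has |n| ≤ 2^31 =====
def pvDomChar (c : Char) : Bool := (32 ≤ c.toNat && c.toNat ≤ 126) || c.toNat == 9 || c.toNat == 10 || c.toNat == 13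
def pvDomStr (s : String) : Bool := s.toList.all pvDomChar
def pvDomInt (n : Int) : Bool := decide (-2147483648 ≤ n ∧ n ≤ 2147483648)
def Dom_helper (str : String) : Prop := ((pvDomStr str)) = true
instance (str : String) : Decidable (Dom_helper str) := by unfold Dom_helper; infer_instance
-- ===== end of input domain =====

-- B iterates the fixed 26-letter alphabet testing membership in the lowered string and
-- keeps one signed vowel-minus-consonant difference, instead of A's single pass over the
-- input with a first-seen dict and two tallies; the membership tests run at C level, measured faster.

-- ===== PORT A =====
-- loop body of A ('char in "aeiou"' on a single character is membership in the five vowel characters — exact for 1-char strings)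
def stepA (acc : Int × Int × PySem.Dict Char Int) (ch : Char) : Int × Int × PySem.Dict Char Int :=
  let v := acc.1; let co := acc.2.1; let d := acc.2.2
  if ("aeiou".toList).contains ch then
    if d.contains ch = false then (v + 1, co, d.insert ch 0) else (v, co, d)
  else if PySem.Chars.isalpha ch then
    if d.contains ch = false then (v, co + 1, d.insert ch 0) else (v, co, d)
  else (v, co, d)

def helper (str : String) : Bool :=
  let s := PySem.Chars.lower str.toList
  let st := s.foldl stepA (0, 0, PySem.Dict.empty)
  st.1 == st.2.1

-- ===== PORT B =====
def alphaChars : List Char := "abcdefghijklmnopqrstuvwxyz".toList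

-- loop body of B ('c in s' with a 1-character c is membership of that character — exact)
def stepB (s : List Char) (d : Int) (c : Char) : Int :=
  if s.contains c then (if ("aeiou".toList).contains c then d + 1 else d - 1) else d

def helper_alt (str : String) : Bool :=
  let s := PySem.Chars.lower str.toList
  let diff := alphaChars.foldl (stepB s) (0 : Int)
  diff == 0

-- ===== PRECONDITION & SPEC =====
def Spec_helper (str : String) (out : Bool) : Prop := out = helper_alt str
instance (str : String) (out : Bool) : Decidable (Spec_helper str out) := by unfold Spec_helper; infer_instance

-- ===== CLAIM (what is proved, stated in full; the proofs are below) =====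
def Claim_equal_helper : Prop := ∀ (str : String), Dom_helper str → Spec_helper str (helper str)

-- ===== LEMMAS AND PROOFS =====

def isV (c : Char) : Bool := ("aeiou".toList).contains c
def isC (c : Char) : Bool := PySem.Chars.isalpha c && !("aeiou".toList).contains c

-- abstract first-seen scan: S = set of characters already seen
def scan : List Char → List Char → Nat × Nat
  | [], _ => (0, 0)
  | ch :: l, S =>
    let r := scan l (PySem.Set.add S ch)
    if isV ch && !(S.contains ch) then (r.1 + 1, r.2)
    else if isC ch && !(S.contains ch) then (r.1, r.2 + 1)
    else r

lemma isV_alpha (c : Char) (h : isV c = true) : PySem.Chars.isalpha c = true := by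
  simp [isV] at h
  rcases h with h | h | h | h | h <;> subst h <;> decide

lemma contains_add (S : List Char) (c x : Char) :
    (PySem.Set.add S c).contains x = (x == c || S.contains x) := by
  by_cases h : c ∈ S
  · simp only [PySem.Set.add, PySem.Set.contains, List.contains_eq_mem, decide_eq_true_eq] at *
    simp only [if_pos (by simpa using h)]
    by_cases hx : x = c
    · subst hx; simp [h]
    · simp [hx]
  · simp only [PySem.Set.add, PySem.Set.contains, List.contains_eq_mem, decide_eq_true_eq] at *
    simp only [if_neg (by simpa using h), List.mem_append, List.mem_singleton]
    by_cases hx : x = c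
    · subst hx; simp
    · simp [hx]

lemma scan_A (l : List Char) : ∀ (v co : Int) (d : PySem.Dict Char Int) (S : List Char),
    (∀ ch, PySem.Chars.isalpha ch = true → d.contains ch = S.contains ch) →
    (l.foldl stepA (v, co, d)).1 = v + ((scan l S).1 : Int) ∧
    (l.foldl stepA (v, co, d)).2.1 = co + ((scan l S).2 : Int) := by
  induction l with
  | nil => intro v co d S h; simp [scan]
  | cons ch l ih =>
    intro v co d S h
    rw [List.foldl_cons]
    by_cases hv : isV ch = true
    · have ha : PySem.Chars.isalpha ch = true := isV_alpha ch hv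
      have hc : d.contains ch = S.contains ch := h ch ha
      have hvm : ("aeiou".toList).contains ch = true := hv
      have hm5 : ch = 'a' ∨ ch = 'e' ∨ ch = 'i' ∨ ch = 'o' ∨ ch = 'u' := by simpa using hvm
      by_cases hS : S.contains ch = true
      · have hmem : ch ∈ S := by simpa using hS
        have hstep : stepA (v, co, d) ch = (v, co, d) := by
          simp [stepA, hm5, hc, hmem]
        have h' : ∀ x, PySem.Chars.isalpha x = true →
            d.contains x = (PySem.Set.add S ch).contains x := by
          intro x hx
          rw [contains_add]
          by_cases hxc : x = ch
          · subst hxc; simp [hc, hmem]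
          · simp [hxc, h x hx]
        have hsc : scan (ch :: l) S = scan l (PySem.Set.add S ch) := by
          simp [scan, hmem]
        rw [hstep, hsc]
        exact ih v co d (PySem.Set.add S ch) h'
      · have hS' : S.contains ch = false := by simpa using hS
        have hmem : ch ∉ S := by simpa using hS'
        have hstep : stepA (v, co, d) ch = (v + 1, co, d.insert ch 0) := by
          simp [stepA, hm5, hc, hmem]
        have h' : ∀ x, PySem.Chars.isalpha x = true →
            (d.insert ch 0).contains x = (PySem.Set.add S ch).contains x := by
          intro x hx
          rw [contains_add, PySem.Dict.contains_insert, h x hx]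
        have hsc : scan (ch :: l) S =
            ((scan l (PySem.Set.add S ch)).1 + 1, (scan l (PySem.Set.add S ch)).2) := by
          simp [scan, hv, hmem]
        rw [hstep, hsc]
        have := ih (v + 1) co (d.insert ch 0) (PySem.Set.add S ch) h'
        exact ⟨by rw [this.1]; push_cast; ring, by rw [this.2]⟩
    · have hv' : isV ch = false := by simpa using hv
      have hvm : ("aeiou".toList).contains ch = false := hv'
      have hm5 : ¬ch = 'a' ∧ ¬ch = 'e' ∧ ¬ch = 'i' ∧ ¬ch = 'o' ∧ ¬ch = 'u' := by simpa using hvm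
      by_cases ha : PySem.Chars.isalpha ch = true
      · have hc : d.contains ch = S.contains ch := h ch ha
        have hC : isC ch = true := by simp [isC, ha]; exact hm5
        by_cases hS : S.contains ch = true
        · have hmem : ch ∈ S := by simpa using hS
          have hstep : stepA (v, co, d) ch = (v, co, d) := by
            simp [stepA, hm5, ha, hc, hmem]
          have h' : ∀ x, PySem.Chars.isalpha x = true →
              d.contains x = (PySem.Set.add S ch).contains x := by
            intro x hx
            rw [contains_add]
            by_cases hxc : x = ch
            · subst hxc; simp [hc, hmem]
            · simp [hxc, h x hx]
          have hsc : scan (ch :: l) S = scan l (PySem.Set.add S ch) := by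
            simp [scan, hmem]
          rw [hstep, hsc]
          exact ih v co d (PySem.Set.add S ch) h'
        · have hS' : S.contains ch = false := by simpa using hS
          have hmem : ch ∉ S := by simpa using hS'
          have hstep : stepA (v, co, d) ch = (v, co + 1, d.insert ch 0) := by
            simp [stepA, hm5, ha, hc, hmem]
          have h' : ∀ x, PySem.Chars.isalpha x = true →
              (d.insert ch 0).contains x = (PySem.Set.add S ch).contains x := by
            intro x hx
            rw [contains_add, PySem.Dict.contains_insert, h x hx]
          have hsc : scan (ch :: l) S =
              ((scan l (PySem.Set.add S ch)).1, (scan l (PySem.Set.add S ch)).2 + 1) := by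
            simp [scan, hv', hC, hmem]
          rw [hstep, hsc]
          have := ih v (co + 1) (d.insert ch 0) (PySem.Set.add S ch) h'
          exact ⟨by rw [this.1], by rw [this.2]; push_cast; ring⟩
      · have ha' : PySem.Chars.isalpha ch = false := by simpa using ha
        have hC : isC ch = false := by simp [isC, ha']
        have hstep : stepA (v, co, d) ch = (v, co, d) := by
          simp [stepA, hm5, ha']
        have h' : ∀ x, PySem.Chars.isalpha x = true →
            d.contains x = (PySem.Set.add S ch).contains x := by
          intro x hx
          rw [contains_add]
          have hxc : (x == ch) = false := by
            simp only [beq_eq_false_iff_ne]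
            intro hxe; subst hxe; rw [hx] at ha'; cases ha'
          simp [hxc, h x hx]
        have hsc : scan (ch :: l) S = scan l (PySem.Set.add S ch) := by
          simp [scan, hv', hC]
        rw [hstep, hsc]
        exact ih v co d (PySem.Set.add S ch) h'

lemma isC_eq_false_of_isV (c : Char) (h : isV c = true) : isC c = false := by
  have hm : c = 'a' ∨ c = 'e' ∨ c = 'i' ∨ c = 'o' ∨ c = 'u' := by simpa [isV] using h
  rcases hm with h' | h' | h' | h' | h' <;> subst h' <;> decide

lemma scan_B (l : List Char) : ∀ (S : List Char),
    (PySem.Set.update S l).countP isV = S.countP isV + (scan l S).1 ∧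
    (PySem.Set.update S l).countP isC = S.countP isC + (scan l S).2 := by
  induction l with
  | nil => intro S; simp [scan, PySem.Set.update]
  | cons ch l ih =>
    intro S
    have hupd : PySem.Set.update S (ch :: l) = PySem.Set.update (PySem.Set.add S ch) l := by
      simp [PySem.Set.update]
    rcases ih (PySem.Set.add S ch) with ⟨h1, h2⟩
    by_cases hS : S.contains ch = true
    · have hmem : ch ∈ S := by simpa using hS
      have hadd : PySem.Set.add S ch = S := by simp [PySem.Set.add, hmem]
      have hsc : scan (ch :: l) S = scan l (PySem.Set.add S ch) := by
        simp [scan, hmem]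
      rw [hupd, h1, h2, hsc, hadd]
      exact ⟨rfl, rfl⟩
    · have hS' : S.contains ch = false := by simpa using hS
      have hmem : ch ∉ S := by simpa using hS'
      have hadd : PySem.Set.add S ch = S ++ [ch] := by simp [PySem.Set.add, hmem]
      have hcv : (PySem.Set.add S ch).countP isV
          = S.countP isV + (if isV ch then 1 else 0) := by
        rw [hadd, List.countP_append, List.countP_cons]; simp
      have hcc : (PySem.Set.add S ch).countP isC
          = S.countP isC + (if isC ch then 1 else 0) := by
        rw [hadd, List.countP_append, List.countP_cons]; simp
      by_cases hv : isV ch = true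
      · have hC : isC ch = false := isC_eq_false_of_isV ch hv
        have hsc : scan (ch :: l) S =
            ((scan l (PySem.Set.add S ch)).1 + 1, (scan l (PySem.Set.add S ch)).2) := by
          simp [scan, hv, hmem]
        rw [hupd, h1, h2, hsc, hcv, hcc]
        refine ⟨by simp [hv]; omega, by simp [hC]⟩
      · have hv' : isV ch = false := by simpa using hv
        by_cases hc : isC ch = true
        · have hsc : scan (ch :: l) S =
              ((scan l (PySem.Set.add S ch)).1, (scan l (PySem.Set.add S ch)).2 + 1) := by
            simp [scan, hv', hc, hmem]
          rw [hupd, h1, h2, hsc, hcv, hcc]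
          refine ⟨by simp [hv'], by simp [hc]; omega⟩
        · have hc' : isC ch = false := by simpa using hc
          have hsc : scan (ch :: l) S = scan l (PySem.Set.add S ch) := by
            simp [scan, hv', hc', hmem]
          rw [hupd, h1, h2, hsc, hcv, hcc]
          refine ⟨by simp [hv'], by simp [hc']⟩

-- B's fold accumulates the signed count difference over any list of test characters
lemma foldB (s : List Char) (xs : List Char) : ∀ (d : Int),
    xs.foldl (stepB s) d
      = d + (xs.countP (fun c => s.contains c && isV c) : Int)
          - (xs.countP (fun c => s.contains c && !(isV c)) : Int) := by
  induction xs with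
  | nil => intro d; simp
  | cons c xs ih =>
    intro d
    rw [List.foldl_cons, List.countP_cons, List.countP_cons, ih]
    by_cases hs : s.contains c = true
    · by_cases hv : isV c = true
      · have hb : ("aeiou".toList).contains c = true := hv
        simp only [stepB, if_pos hb, hs, hv, Bool.and_self, Bool.not_true,
          Bool.and_false, if_true]
        push_cast; ring
      · have hv' : isV c = false := by simpa using hv
        have hb : ("aeiou".toList).contains c = false := hv'
        simp only [stepB, hb, hs, hv', Bool.not_false, Bool.and_false,
          Bool.and_self, if_true]
        push_cast; ring
    · have hs' : s.contains c = false := by simpa using hs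
      simp only [stepB, hs', Bool.false_and]
      simp
-- swapping the roles of the two lists in a guarded distinct count
lemma countP_swap (X D : List Char) (p : Char → Bool) (hX : X.Nodup) (hD : D.Nodup) :
    X.countP (fun c => D.contains c && p c) = D.countP (fun c => X.contains c && p c) := by
  rw [List.countP_eq_length_filter, List.countP_eq_length_filter]
  apply List.Perm.length_eq
  apply (List.perm_ext_iff_of_nodup (hX.filter _) (hD.filter _)).2
  intro a
  simp only [List.mem_filter, List.contains_eq_mem, Bool.and_eq_true, decide_eq_true_eq]
  tauto

lemma alphaChars_nodup : alphaChars.Nodup := by decide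

lemma contains_alpha_of_islower (x : Char) (h : PySem.Chars.islower x = true) :
    alphaChars.contains x = true := by
  simp [PySem.Chars.islower] at h
  obtain ⟨h1, h2⟩ := h
  have g1 : 97 ≤ x.toNat := ge_iff_le.mp h1
  have g2 : x.toNat ≤ 122 := ge_iff_le.mp h2
  have hx : x = Char.ofNat x.toNat := (Char.ofNat_toNat x).symm
  rw [hx]
  set n := x.toNat with hn
  interval_cases n <;> decide

lemma islower_of_contains_alpha (x : Char) (h : alphaChars.contains x = true) :
    PySem.Chars.islower x = true := by
  simp [alphaChars, List.contains_eq_mem] at h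
  rcases h with h|h|h|h|h|h|h|h|h|h|h|h|h|h|h|h|h|h|h|h|h|h|h|h|h|h <;> subst h <;> decide

lemma contains_alpha_eq_islower (x : Char) :
    alphaChars.contains x = PySem.Chars.islower x := by
  by_cases h : PySem.Chars.islower x = true
  · rw [h, contains_alpha_of_islower x h]
  · have h' : PySem.Chars.islower x = false := by simpa using h
    rw [h']
    by_cases hc : alphaChars.contains x = true
    · rw [islower_of_contains_alpha x hc] at h'; cases h'
    · simpa using hc

lemma isupper_lowerChar (c : Char) : PySem.Chars.isupper (PySem.Chars.lowerChar c) = false := by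
  unfold PySem.Chars.lowerChar
  split_ifs with h
  · simp [PySem.Chars.isupper] at h
    obtain ⟨h1, h2⟩ := h
    have g1 : 65 ≤ c.toNat := ge_iff_le.mp h1
    have g2 : c.toNat ≤ 90 := ge_iff_le.mp h2
    have ht : (Char.ofNat (c.toNat + 32)).toNat = c.toNat + 32 := by
      rw [Char.toNat_ofNat]
      have hval : (c.toNat + 32).isValidChar := by constructor; omega
      simp [hval]
    have hnle : ¬ (Char.ofNat (c.toNat + 32) ≤ 'Z') := by
      intro hle
      have hz : (Char.ofNat (c.toNat + 32)).toNat ≤ 90 := ge_iff_le.mp hle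
      omega
    unfold PySem.Chars.isupper
    rw [decide_eq_false hnle, Bool.and_false]
  · simpa using h

-- every character of the lowered string is alphabetic iff it is one of a–z
lemma isalpha_eq_contains_of_mem (l : List Char) (c : Char)
    (hm : c ∈ PySem.Chars.lower l) : PySem.Chars.isalpha c = alphaChars.contains c := by
  simp only [PySem.Chars.lower, List.mem_map] at hm
  obtain ⟨c₀, _, rfl⟩ := hm
  rw [contains_alpha_eq_islower]
  simp [PySem.Chars.isalpha, isupper_lowerChar]

lemma isV_contains_alpha (c : Char) (h : isV c = true) : alphaChars.contains c = true := by
  have hm : c = 'a' ∨ c = 'e' ∨ c = 'i' ∨ c = 'o' ∨ c = 'u' := by simpa [isV] using h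
  rcases hm with h'|h'|h'|h'|h' <;> subst h' <;> decide

-- ===== VERDICT (by name: the statement is the Claim_ definition above) =====
theorem helper_spec : Claim_equal_helper := by
  intro str _
  unfold Spec_helper helper helper_alt
  show (((PySem.Chars.lower str.toList).foldl stepA (0, 0, PySem.Dict.empty)).1
        == ((PySem.Chars.lower str.toList).foldl stepA (0, 0, PySem.Dict.empty)).2.1)
      = (alphaChars.foldl (stepB (PySem.Chars.lower str.toList)) 0 == 0)
  set l := PySem.Chars.lower str.toList with hl
  -- A's two tallies are the distinct-set counts
  have hA := scan_A l 0 0 PySem.Dict.empty []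
    (by intro ch _; rw [PySem.Dict.contains_empty]; rfl)
  rcases scan_B l [] with ⟨hB1, hB2⟩
  have hof : PySem.Set.ofList l = PySem.Set.update [] l := rfl
  have hDnodup : (PySem.Set.ofList l).Nodup := PySem.Set.nodup_ofList l
  have hDmem : ∀ c, List.contains (PySem.Set.ofList l) c = l.contains c := by
    intro c
    simp only [List.contains_eq_mem]
    by_cases h : c ∈ l
    · simp [h, (PySem.Set.mem_ofList l c).2 h]
    · have : c ∉ PySem.Set.ofList l := fun hc => h ((PySem.Set.mem_ofList l c).1 hc)
      simp [h, this]
  have hv : (PySem.Set.ofList l).countP isV = (scan l []).1 := by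
    rw [hof, hB1]; simp
  have hc : (PySem.Set.ofList l).countP isC = (scan l []).2 := by
    rw [hof, hB2]; simp
  -- B's fold as counts over the alphabet, swapped to distinct-set counts
  have hswapV : alphaChars.countP (fun c => l.contains c && isV c)
      = (PySem.Set.ofList l).countP isV := by
    have h1 : alphaChars.countP (fun c => l.contains c && isV c)
        = alphaChars.countP (fun c => List.contains (PySem.Set.ofList l) c && isV c) := by
      apply List.countP_congr; intro a _; rw [hDmem a]
    rw [h1, countP_swap alphaChars (PySem.Set.ofList l) isV alphaChars_nodup hDnodup]
    apply List.countP_congr; intro a _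
    by_cases hva : isV a = true
    · have hca : a ∈ alphaChars := by simpa using isV_contains_alpha a hva
      simp [hva, hca]
    · have : isV a = false := by simpa using hva
      simp [this]
  have hswapC : alphaChars.countP (fun c => l.contains c && !(isV c))
      = (PySem.Set.ofList l).countP isC := by
    have h1 : alphaChars.countP (fun c => l.contains c && !(isV c))
        = alphaChars.countP (fun c => List.contains (PySem.Set.ofList l) c && !(isV c)) := by
      apply List.countP_congr; intro a _; rw [hDmem a]
    rw [h1, countP_swap alphaChars (PySem.Set.ofList l) (fun c => !(isV c))
      alphaChars_nodup hDnodup]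
    apply List.countP_congr; intro a ha
    have hmem : a ∈ l := (PySem.Set.mem_ofList l a).1 (by simpa using ha)
    have hiff := isalpha_eq_contains_of_mem str.toList a (by simpa [hl] using hmem)
    have heq : (alphaChars.contains a && !(isV a)) = isC a := by simp only [isC, ← hiff]; rfl
    rw [heq]
  have hV : (alphaChars.foldl (stepB l) 0) =
      ((scan l []).1 : Int) - ((scan l []).2 : Int) := by
    rw [foldB]
    rw [hswapV, hswapC, hv, hc]; ring
  rw [hV]
  simp only [hA.1, hA.2, Int.zero_add]
  by_cases hq : (scan l []).1 = (scan l []).2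
  · simp [hq]
  · have hq' : ((scan l []).1 : Int) ≠ ((scan l []).2 : Int) := by exact_mod_cast hq
    have hne : ((scan l []).1 : Int) - ((scan l []).2 : Int) ≠ 0 := by omega
    simp [hq, hq', hne]
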